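-- pv_equiv track=rewrite | github.com/GodOrGovern/Project_Euler | problems/Python/e105.py | boundaries
-- ===== SOURCE A (Python) =====
-- def boundaries(base_set):
--     ''' Given 'base_set', determine the minimum and maximum values for
--     sums of subsets of length 0 to 'len(base_set)'. Return as a list of
--     lists, where each index represents a length and each sub-list has two
--     values: the min and max '''
--     base_set.sort()
--     base_len = len(base_set)
--     bounds = [[0, 0] for _ in range(base_len + 1)]
--     bounds[1] = [base_set[0], base_set[-1]]
--     for n in range(2, base_len+1):
--         bounds[n][0] = bounds[n-1][0] + base_set[n-1]
--         bounds[n][1] = bounds[n-1][1] + base_set[-n]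
--     return bounds
-- ===== SOURCE B (Python) =====
-- def boundaries(base_set):
--     ''' Min/max subset sums per length via one prefix-sum list over the
--     sorted input: max sum of length k = total - (min sum of length n-k). '''
--     base_set.sort()
--     n = len(base_set)
--     mins = [0]
--     for x in base_set:
--         mins.append(mins[-1] + x)
--     total = mins[n]
--     return [[mins[k], total - mins[n - k]] for k in range(n + 1)]
-- ===== Notes on version B (the rewrite author's own statement) =====
-- stated objective: simpler
-- what changed: B replaces A's mutable bounds table filled by a two-ended loop with a single prefix-sum list over the sorted input and the complement identity max(k) = total - min(n-k); both A and B sort base_set in place (return-value equivalence). Pre_ excludes only the empty list, on which A raises IndexError.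
import Mathlib
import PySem

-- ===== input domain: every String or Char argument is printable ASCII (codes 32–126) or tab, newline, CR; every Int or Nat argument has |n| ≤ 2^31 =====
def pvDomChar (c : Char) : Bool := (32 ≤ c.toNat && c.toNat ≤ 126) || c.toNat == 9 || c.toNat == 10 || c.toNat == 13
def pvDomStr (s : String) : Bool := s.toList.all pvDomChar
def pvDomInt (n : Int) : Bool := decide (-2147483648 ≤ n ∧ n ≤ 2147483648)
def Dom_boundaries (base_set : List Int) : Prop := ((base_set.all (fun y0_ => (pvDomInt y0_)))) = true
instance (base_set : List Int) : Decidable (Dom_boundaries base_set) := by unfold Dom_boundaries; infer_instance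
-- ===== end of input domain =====

-- B replaces A's two-ended mutable-table loop with one prefix-sum list over the sorted
-- input and the identity max(k) = total - min(n-k); simpler, same cost. Both A and B
-- sort base_set in place in Python: the equivalence proved here is about the RETURN value.

-- ===== PORT A =====
def boundaries (base_set : List Int) : List (List Int) :=
  let s := PySem.List.sorted base_set (fun x => x) false
  let base_len := s.length
  let bounds := List.replicate (base_len + 1) ([0, 0] : List Int)
  let bounds := PySem.List.pySetD bounds 1
    [PySem.List.pyGetD s 0 0, PySem.List.pyGetD s (-1) 0]
  (PySem.List.pyRange 2 ((base_len : Int) + 1) 1).foldl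
    (fun b n =>
      -- bounds[n][0] = bounds[n-1][0] + base_set[n-1]; bounds[n][1] = bounds[n-1][1] + base_set[-n]
      PySem.List.pySetD b n
        [PySem.List.pyGetD (PySem.List.pyGetD b (n - 1) []) 0 0 + PySem.List.pyGetD s (n - 1) 0,
         PySem.List.pyGetD (PySem.List.pyGetD b (n - 1) []) 1 0 + PySem.List.pyGetD s (-n) 0])
    bounds

-- ===== PORT B =====
def boundaries_alt (base_set : List Int) : List (List Int) :=
  let s := PySem.List.sorted base_set (fun x => x) false
  let n := s.length
  let mins := s.foldl (fun acc x => acc ++ [PySem.List.pyGetD acc (-1) 0 + x]) [(0 : Int)]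
  let total := PySem.List.pyGetD mins (n : Int) 0
  (PySem.List.pyRange 0 ((n : Int) + 1) 1).map
    (fun k => [PySem.List.pyGetD mins k 0, total - PySem.List.pyGetD mins ((n : Int) - k) 0])

-- ===== PRECONDITION & SPEC =====
-- Pre_ excludes only the empty list, on which Python A raises IndexError (bounds[1] / base_set[0]).
def Pre_boundaries (base_set : List Int) : Prop := base_set ≠ []
instance (base_set : List Int) : Decidable (Pre_boundaries base_set) := by
  unfold Pre_boundaries; infer_instance
def pvWitness_boundaries : List Int := ([3, 1, 2])

def Spec_boundaries (base_set : List Int) (out : List (List Int)) : Prop := out = boundaries_alt base_set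
instance (base_set : List Int) (out : List (List Int)) : Decidable (Spec_boundaries base_set out) := by unfold Spec_boundaries; infer_instance

-- ===== CLAIM (what is proved, stated in full; the proofs are below) =====
def Claim_equal_boundaries : Prop := ∀ (base_set : List Int), Dom_boundaries base_set → Pre_boundaries base_set → Spec_boundaries base_set (boundaries base_set)

-- ===== LEMMAS AND PROOFS =====

-- the common closed form both ports are reduced to: entry k of the result is
-- [sum of the k smallest elements, total − sum of the (n−k) smallest elements]
def pvTarget (s : List Int) : List (List Int) :=
  (List.range (s.length + 1)).map
    (fun k => [((s.take k).sum), s.sum - ((s.take (s.length - k)).sum)])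

theorem foldl_prefix (s : List Int) (acc : List Int) :
    s.foldl (fun a x => a ++ [PySem.List.pyGetD a (-1) 0 + x]) acc
    = acc ++ (List.range s.length).map
        (fun k => PySem.List.pyGetD acc (-1) 0 + (s.take (k+1)).sum) := by
  induction s generalizing acc with
  | nil => simp
  | cons x t ih =>
    simp only [List.foldl_cons, ih, List.length_cons, List.range_succ_eq_map,
      List.map_cons, List.map_map, PySem.List.pyGetD_neg_one_append_singleton]
    simp [List.append_assoc, Function.comp]
    intro k _
    ring

theorem mins_eq (s : List Int) :
    s.foldl (fun a x => a ++ [PySem.List.pyGetD a (-1) 0 + x]) [(0:Int)]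
    = (List.range (s.length + 1)).map (fun k => (s.take k).sum) := by
  rw [foldl_prefix]
  have h0 : PySem.List.pyGetD [(0:Int)] (-1) 0 = 0 := by decide
  simp [h0, List.range_succ_eq_map, List.map_map, Function.comp]

theorem pv_alt_eq_target (base_set : List Int) :
    boundaries_alt base_set = pvTarget (PySem.List.sorted base_set (fun x => x) false) := by
  unfold boundaries_alt pvTarget
  set s := PySem.List.sorted base_set (fun x => x) false with hs
  simp only [mins_eq]
  have htot : PySem.List.pyGetD ((List.range (s.length + 1)).map (fun k => (s.take k).sum)) (s.length : Int) 0 = s.sum := by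
    rw [PySem.List.pyGetD_natCast]
    rw [List.getD_eq_getElem?_getD]
    simp
  rw [htot]
  have hr : PySem.List.pyRange 0 ((s.length : Int) + 1) 1
      = (List.range (s.length + 1)).map (fun k : Nat => (k : Int)) := by
    rw [show ((s.length : Int) + 1) = ((s.length + 1 : Nat) : Int) by push_cast; ring]
    exact PySem.List.pyRange_zero_natCast _
  rw [hr, List.map_map]
  apply List.map_congr_left
  intro k hk
  simp only [List.mem_range] at hk
  have h1 : PySem.List.pyGetD ((List.range (s.length + 1)).map (fun k => (s.take k).sum)) (k : Int) 0 = (s.take k).sum := by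
    rw [PySem.List.pyGetD_natCast, List.getD_eq_getElem?_getD]
    simp [hk]
  have h2 : PySem.List.pyGetD ((List.range (s.length + 1)).map (fun k => (s.take k).sum)) ((s.length : Int) - (k : Int)) 0 = (s.take (s.length - k)).sum := by
    have hcast : ((s.length : Int) - (k : Int)) = ((s.length - k : Nat) : Int) := by omega
    rw [hcast, PySem.List.pyGetD_natCast, List.getD_eq_getElem?_getD]
    have : s.length - k < s.length + 1 := by omega
    simp [this]
  simp [h1, h2]

-- entries of A's table after the loop has filled indices 1..m
def pvE (s : List Int) (m k : Nat) : List Int :=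
  if 1 ≤ k ∧ k ≤ m then [(s.take k).sum, s.sum - (s.take (s.length - k)).sum] else [0, 0]

theorem set_map_range {α : Type} (f : Nat → α) (N i : Nat) (v : α) :
    ((List.range N).map f).set i v = (List.range N).map (fun k => if k = i then v else f k) := by
  apply List.ext_getElem
  · simp
  · intro j hj hj'
    simp only [List.getElem_set, List.getElem_map, List.getElem_range]
    by_cases hij : i = j
    · subst hij; simp
    · simp [hij, Ne.symm hij]

theorem sum_take_succ (s : List Int) (j : Nat) (h : j < s.length) :
    (s.take (j+1)).sum = (s.take j).sum + s.getD j 0 := by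
  have h1 := List.sum_take_succ s j h
  simp [List.getD_eq_getElem?_getD, List.getElem?_eq_getElem h]
  omega

theorem head_sum (s : List Int) (hs : s ≠ []) :
    PySem.List.pyGetD s 0 0 = (s.take 1).sum := by
  cases s with
  | nil => simp at hs
  | cons a t => simp [PySem.List.pyGetD_zero_cons]

theorem last_sum (s : List Int) (hs : s ≠ []) :
    PySem.List.pyGetD s (-1) 0 = s.sum - (s.take (s.length - 1)).sum := by
  rw [PySem.List.pyGetD_neg_one s 0 hs]
  have h1 : s.dropLast ++ [s.getLast hs] = s := List.dropLast_append_getLast hs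
  have h2 : s.dropLast = s.take (s.length - 1) := List.dropLast_eq_take
  have h3 : s.sum = (s.take (s.length - 1)).sum + s.getLast hs := by
    conv_lhs => rw [← h1]
    rw [List.sum_append]
    rw [h2]
    simp
  omega

theorem init_eq (s : List Int) (hs : s ≠ []) :
    PySem.List.pySetD (List.replicate (s.length + 1) ([0, 0] : List Int)) 1
      [PySem.List.pyGetD s 0 0, PySem.List.pyGetD s (-1) 0]
    = (List.range (s.length + 1)).map (pvE s 1) := by
  have hrep : List.replicate (s.length + 1) ([0, 0] : List Int)
      = (List.range (s.length + 1)).map (fun _ => ([0, 0] : List Int)) := by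
    simp [List.map_const']
  have h1 : PySem.List.pySetD (List.replicate (s.length + 1) ([0, 0] : List Int)) 1
      [PySem.List.pyGetD s 0 0, PySem.List.pyGetD s (-1) 0]
      = (List.replicate (s.length + 1) ([0, 0] : List Int)).set 1
        [PySem.List.pyGetD s 0 0, PySem.List.pyGetD s (-1) 0] := by
    rw [show (1:Int) = ((1:Nat):Int) by norm_num, PySem.List.pySetD_natCast]
  have hlen : 0 < s.length := List.length_pos_iff.mpr hs
  rw [h1, hrep, set_map_range]
  apply List.map_congr_left
  intro k hk
  simp only [List.mem_range] at hk
  unfold pvE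
  rcases eq_or_ne k 1 with h | h
  · subst h
    simp [head_sum s hs, last_sum s hs]
  · simp [h]
    omega

theorem loopA (s : List Int) (hs : s ≠ []) (m : Nat) (hm : 1 ≤ m) (hmn : m ≤ s.length) :
    (PySem.List.pyRange 2 ((m : Int) + 1) 1).foldl
      (fun b n =>
        PySem.List.pySetD b n
          [PySem.List.pyGetD (PySem.List.pyGetD b (n - 1) []) 0 0 + PySem.List.pyGetD s (n - 1) 0,
           PySem.List.pyGetD (PySem.List.pyGetD b (n - 1) []) 1 0 + PySem.List.pyGetD s (-n) 0])
      (PySem.List.pySetD (List.replicate (s.length + 1) ([0, 0] : List Int)) 1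
        [PySem.List.pyGetD s 0 0, PySem.List.pyGetD s (-1) 0])
    = (List.range (s.length + 1)).map (pvE s m) := by
  induction m, hm using Nat.le_induction with
  | base =>
    rw [show ((1 : Nat) : Int) + 1 = 2 by norm_num,
      PySem.List.pyRange_one_eq_nil (by norm_num)]
    exact init_eq s hs
  | succ m hm ih =>
    have hmn' : m ≤ s.length := by omega
    have hsplit : PySem.List.pyRange 2 (((m + 1 : Nat) : Int) + 1) 1
        = PySem.List.pyRange 2 ((m : Int) + 1) 1 ++ [(m : Int) + 1] := by
      rw [show (((m + 1 : Nat) : Int) + 1) = ((m : Int) + 1) + 1 by push_cast; ring]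
      exact PySem.List.pyRange_one_succ_right (by omega)
    rw [hsplit, List.foldl_append, ih hmn']
    simp only [List.foldl_cons, List.foldl_nil]
    have e1 : ((m : Int) + 1 - 1) = ((m : Nat) : Int) := by ring
    have hb : PySem.List.pyGetD ((List.range (s.length + 1)).map (pvE s m)) ((m : Nat) : Int) []
        = [(s.take m).sum, s.sum - (s.take (s.length - m)).sum] := by
      rw [PySem.List.pyGetD_natCast]
      rw [List.getD_eq_getElem?_getD]
      have : m < s.length + 1 := by omega
      simp [this, pvE, hm]
    have hsm : PySem.List.pyGetD s ((m : Nat) : Int) 0 = s.getD m 0 := by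
      rw [PySem.List.pyGetD_natCast]
    have hneg : PySem.List.pyGetD s (-((m : Int) + 1)) 0 = s[s.length - (m + 1)]'(by omega) := by
      rw [show (-((m : Int) + 1)) = -(((m + 1 : Nat)) : Int) by push_cast; ring]
      rw [PySem.List.pyGetD_neg_natCast s (m + 1) 0 (by omega) (by omega)]
    have hset : ∀ v, PySem.List.pySetD ((List.range (s.length + 1)).map (pvE s m)) ((m : Int) + 1) v
        = ((List.range (s.length + 1)).map (pvE s m)).set (m + 1) v := by
      intro v
      rw [show ((m : Int) + 1) = ((m + 1 : Nat) : Int) by push_cast; ring, PySem.List.pySetD_natCast]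
    rw [e1, hb, hsm, hneg, hset, set_map_range]
    apply List.map_congr_left
    intro k hk
    simp only [List.mem_range] at hk
    by_cases hk1 : k = m + 1
    · subst hk1
      rw [if_pos rfl]
      unfold pvE
      rw [if_pos ⟨by omega, le_refl _⟩]
      have hA : (s.take m).sum + s.getD m 0 = (s.take (m + 1)).sum :=
        (sum_take_succ s m (by omega)).symm
      have hgd : s.getD (s.length - (m + 1)) 0 = s[s.length - (m + 1)]'(by omega) := by
        rw [List.getD_eq_getElem?_getD, List.getElem?_eq_getElem (by omega)]
        rfl
      have hB := sum_take_succ s (s.length - (m + 1)) (by omega)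
      rw [show s.length - (m + 1) + 1 = s.length - m by omega] at hB
      rw [hgd] at hB
      rw [PySem.List.pyGetD_zero_cons,
        show (PySem.List.pyGetD [(s.take m).sum, s.sum - (s.take (s.length - m)).sum] 1 0)
          = s.sum - (s.take (s.length - m)).sum by
            rw [PySem.List.pyGetD_ofNat' _ 1 0]; rfl]
      rw [List.cons.injEq, List.cons.injEq]
      refine ⟨by omega, by omega, rfl⟩
    · rw [if_neg hk1]
      unfold pvE
      by_cases hle : 1 ≤ k ∧ k ≤ m
      · rw [if_pos hle, if_pos ⟨hle.1, by omega⟩]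
      · rw [if_neg hle, if_neg (by omega)]

theorem pv_a_eq_target (base_set : List Int) (h : base_set ≠ []) :
    boundaries base_set = pvTarget (PySem.List.sorted base_set (fun x => x) false) := by
  unfold boundaries pvTarget
  set s := PySem.List.sorted base_set (fun x => x) false with hsdef
  have hsne : s ≠ [] := by
    have hp := PySem.List.sorted_perm base_set (fun x => x) false
    intro hnil
    rw [hsdef] at hnil
    rw [hnil] at hp
    exact h (List.Perm.nil_eq hp).symm
  have hlen : 1 ≤ s.length := List.length_pos_iff.mpr hsne
  simp only []
  rw [loopA s hsne s.length hlen (le_refl _)]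
  apply List.map_congr_left
  intro k hk
  simp only [List.mem_range] at hk
  unfold pvE
  by_cases h1 : 1 ≤ k ∧ k ≤ s.length
  · rw [if_pos h1]
  · rw [if_neg h1]
    have hk0 : k = 0 := by omega
    subst hk0
    simp

-- ===== VERDICT (by name: the statement is the Claim_ definition above) =====
theorem boundaries_spec : Claim_equal_boundaries := by
  intro bs _ hpre
  unfold Spec_boundaries
  rw [pv_a_eq_target bs hpre, pv_alt_eq_target]
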